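-- pv_equiv track=rewrite | github.com/eporetsky/PlantApp | app.py | alignment_to_range_list
-- ===== SOURCE A (Python) =====
-- def alignment_to_range_list(alignment):
--     # function takes a single sequence from an alignment
--     # returns a 1-d list of paired star and end coordinates for each aligned segment
--     count = -1 # because I use continue I moved the counter to the beginning of the loop
--     streak = False # keeps track of streaks of non-gapped characters in the loop progression
--     range_list = []
--     for s in alignment:
--         count += 1
--         if s == "-":
--             if streak == True:
--                 range_list.append(count)
--                 streak = False
--             continue
--         elif streak == True:
--             continue
--         else:
--             range_list.append(count)
--             streak = True
--     # When alignment doesn't end with a gap finish the list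
--     if len(range_list)%2:
--         range_list.append(len(alignment))
--     return range_list
-- ===== SOURCE B (Python) =====
-- def alignment_to_range_list(alignment):
--     # run-based scan: split the alignment into maximal gap / non-gap runs;
--     # emit [start, end) for each non-gap run
--     range_list = []
--     i = 0
--     n = len(alignment)
--     while i < n:
--         gap = alignment[i] == "-"
--         j = i + 1
--         while j < n and (alignment[j] == "-") == gap:
--             j += 1
--         if not gap:
--             range_list.append(i)
--             range_list.append(j)
--         i = j
--     return range_list
-- ===== Notes on version B (the rewrite author's own statement) =====
-- stated objective: idiomatic
-- what changed: Replaces the char-by-char streak-flag loop with its end-of-string parity fix by a run-based scan that splits the alignment into maximal gap/non-gap runs and emits [start, end) directly for each non-gap run, needing no trailing fix-up.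
import Mathlib
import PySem

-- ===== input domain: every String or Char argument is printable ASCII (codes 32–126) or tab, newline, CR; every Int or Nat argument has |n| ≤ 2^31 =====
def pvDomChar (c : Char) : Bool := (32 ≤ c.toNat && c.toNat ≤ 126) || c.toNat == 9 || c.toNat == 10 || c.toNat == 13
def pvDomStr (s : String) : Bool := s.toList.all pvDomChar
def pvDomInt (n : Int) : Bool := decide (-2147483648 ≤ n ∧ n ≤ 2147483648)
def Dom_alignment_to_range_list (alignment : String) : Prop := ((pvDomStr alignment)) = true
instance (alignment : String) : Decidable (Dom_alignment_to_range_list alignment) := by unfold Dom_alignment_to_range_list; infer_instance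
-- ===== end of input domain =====

-- B replaces A's char-by-char streak flag (with its end-of-string parity fix) by a
-- run-based scan over maximal gap/non-gap runs, emitting [start, end) per non-gap run
-- (objective: idiomatic; same O(n) cost).

-- ===== PORT A =====
def alignment_to_range_list (alignment : String) : List Int :=
  let st := alignment.toList.foldl
    (fun (st : Int × Bool × List Int) s =>
      let count := st.1 + 1
      let streak := st.2.1
      let range_list := st.2.2
      if s = '-' then
        if streak = true then (count, false, range_list ++ [count])
        else (count, streak, range_list)
      else if streak = true then (count, streak, range_list)
      else (count, true, range_list ++ [count]))
    (-1, false, [])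
  let range_list := st.2.2
  if range_list.length % 2 = 1 then range_list ++ [(alignment.toList.length : Int)]
  else range_list

-- ===== PORT B =====
-- B's outer while loop → recursion on the remaining suffix; B's inner 'j' scan →
-- length of the takeWhile prefix of chars with the same gap-ness as the run's head
def alignment_to_range_list_altGo : List Char → Int → List Int
  | [], _ => []
  | c :: cs, i =>
    let gap := decide (c = '-')
    let t := cs.takeWhile (fun d => decide (d = '-') == gap)
    let rest := cs.dropWhile (fun d => decide (d = '-') == gap)
    let run : Int := 1 + (t.length : Int)
    (if gap then [] else [i, i + run]) ++ alignment_to_range_list_altGo rest (i + run)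
termination_by cs _ => cs.length
decreasing_by
  exact Nat.lt_succ_of_le (List.length_dropWhile_le ..)

def alignment_to_range_list_alt (alignment : String) : List Int :=
  alignment_to_range_list_altGo alignment.toList 0

-- ===== PRECONDITION & SPEC =====
def Spec_alignment_to_range_list (alignment : String) (out : List Int) : Prop := out = alignment_to_range_list_alt alignment
instance (alignment : String) (out : List Int) : Decidable (Spec_alignment_to_range_list alignment out) := by unfold Spec_alignment_to_range_list; infer_instance

-- ===== CLAIM (what is proved, stated in full; the proofs are below) =====
def Claim_equal_alignment_to_range_list : Prop := ∀ (alignment : String), Dom_alignment_to_range_list alignment → Spec_alignment_to_range_list alignment (alignment_to_range_list alignment)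

-- ===== LEMMAS AND PROOFS =====

-- canonical form: the streak flag at the end of a scan that starts with streak `b`
def pvEndStreak : Bool → List Char → Bool
  | b, [] => b
  | _, c :: cs => pvEndStreak (!decide (c = '-')) cs

-- canonical form: the coordinates appended during the scan (without the final close)
def pvBody : Bool → List Char → Int → List Int
  | _, [], _ => []
  | b, c :: cs, p =>
    if c = '-' then (if b then [p] else []) ++ pvBody false cs (p + 1)
    else (if b then [] else [p]) ++ pvBody true cs (p + 1)

theorem pvFoldA (cs : List Char) : ∀ (count : Int) (b : Bool) (rl : List Int),
    cs.foldl
      (fun (st : Int × Bool × List Int) s =>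
        let count := st.1 + 1
        let streak := st.2.1
        let range_list := st.2.2
        if s = '-' then
          if streak = true then (count, false, range_list ++ [count])
          else (count, streak, range_list)
        else if streak = true then (count, streak, range_list)
        else (count, true, range_list ++ [count])) (count, b, rl)
    = (count + cs.length, pvEndStreak b cs, rl ++ pvBody b cs (count + 1)) := by
  induction cs with
  | nil => intro count b rl; simp [pvEndStreak, pvBody]
  | cons c cs ih =>
    intro count b rl
    by_cases hc : c = '-' <;> cases b <;>
      simp [hc, List.foldl_cons, ih, pvEndStreak, pvBody] <;> omega

theorem pvParity (cs : List Char) : ∀ (b : Bool) (p : Int),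
    (pvBody b cs p).length % 2 = (if pvEndStreak b cs = b then 0 else 1) := by
  induction cs with
  | nil => intro b p; simp [pvBody, pvEndStreak]
  | cons c cs ih =>
    intro b p
    by_cases hc : c = '-'
    · have h := ih false (p + 1)
      cases b
      · simpa [pvBody, pvEndStreak, hc] using h
      · rcases hE : pvEndStreak false cs with _ | _ <;>
          simp [pvBody, pvEndStreak, hc, hE] at h ⊢ <;> omega
    · have h := ih true (p + 1)
      cases b
      · rcases hE : pvEndStreak true cs with _ | _ <;>
          simp [pvBody, pvEndStreak, hc, hE] at h ⊢ <;> omega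
      · simpa [pvBody, pvEndStreak, hc] using h

theorem pvA_char (alignment : String) :
    alignment_to_range_list alignment
    = pvBody false alignment.toList 0
      ++ (if pvEndStreak false alignment.toList then [(alignment.toList.length : Int)] else []) := by
  unfold alignment_to_range_list
  rw [pvFoldA]
  have h := pvParity alignment.toList false 0
  rcases hE : pvEndStreak false alignment.toList with _ | _ <;> simp [hE] at h ⊢ <;> omega

theorem pvGapRun (t : List Char) : ∀ (rest : List Char) (p : Int), (∀ d ∈ t, d = '-') →
    pvBody false (t ++ rest) p = pvBody false rest (p + t.length)
    ∧ pvEndStreak false (t ++ rest) = pvEndStreak false rest := by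
  induction t with
  | nil => intro rest p _; simp
  | cons c t ih =>
    intro rest p h
    have hc : c = '-' := h c (by simp)
    have hi := ih rest (p + 1) (fun d hd => h d (by simp [hd]))
    refine ⟨?_, ?_⟩
    · rw [List.cons_append]
      show pvBody false (c :: (t ++ rest)) p = _
      rw [show pvBody false (c :: (t ++ rest)) p = pvBody false (t ++ rest) (p + 1) from by
        simp [pvBody, hc]]
      rw [hi.1]; congr 1; simp only [List.length_cons]; push_cast; omega
    · rw [List.cons_append]
      show pvEndStreak false (c :: (t ++ rest)) = _
      simp [pvEndStreak, hc, hi.2]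

theorem pvNonGapRun (t : List Char) : ∀ (rest : List Char) (p : Int), (∀ d ∈ t, ¬ d = '-') →
    pvBody true (t ++ rest) p = pvBody true rest (p + t.length)
    ∧ pvEndStreak true (t ++ rest) = pvEndStreak true rest := by
  induction t with
  | nil => intro rest p _; simp
  | cons c t ih =>
    intro rest p h
    have hc : ¬ c = '-' := h c (by simp)
    have hi := ih rest (p + 1) (fun d hd => h d (by simp [hd]))
    refine ⟨?_, ?_⟩
    · rw [List.cons_append]
      show pvBody true (c :: (t ++ rest)) p = _
      rw [show pvBody true (c :: (t ++ rest)) p = pvBody true (t ++ rest) (p + 1) from by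
        simp [pvBody, hc]]
      rw [hi.1]; congr 1; simp only [List.length_cons]; push_cast; omega
    · rw [List.cons_append]
      show pvEndStreak true (c :: (t ++ rest)) = _
      simp [pvEndStreak, hc, hi.2]

-- the first char after a maximal run (if any) fails the run's predicate
theorem pvDropHead {p : Char → Bool} {l r : List Char} {x : Char}
    (h : l.dropWhile p = x :: r) : p x = false := by
  have hh := List.head?_dropWhile_not p l
  rw [h] at hh
  exact hh

theorem pvB_char (n : Nat) : ∀ (cs : List Char), cs.length ≤ n → ∀ (i : Int),
    alignment_to_range_list_altGo cs i
    = pvBody false cs i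
      ++ (if pvEndStreak false cs then [i + (cs.length : Int)] else []) := by
  induction n with
  | zero =>
    intro cs h i
    have hnil : cs = [] := List.eq_nil_of_length_eq_zero (Nat.le_zero.mp h)
    subst hnil
    simp [alignment_to_range_list_altGo, pvBody, pvEndStreak]
  | succ n ih =>
    intro cs h i
    match cs, h with
    | [], _ => simp [alignment_to_range_list_altGo, pvBody, pvEndStreak]
    | c :: cs', h =>
      simp only [alignment_to_range_list_altGo]
      set q : Char → Bool := fun d => decide (d = '-') == decide (c = '-') with hq
      set t := cs'.takeWhile q with ht
      set rest := cs'.dropWhile q with hrst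
      have hsplit : t ++ rest = cs' := List.takeWhile_append_dropWhile
      have hlen : t.length + rest.length = cs'.length := by
        rw [← hsplit, List.length_append]
      have hrle : rest.length ≤ n := by
        have h2 : rest.length ≤ cs'.length := List.length_dropWhile_le q cs'
        simp only [List.length_cons] at h; omega
      clear_value q t rest
      rw [ih rest hrle]
      by_cases hc : c = '-'
      · -- gap run: contributes nothing, position advances past the run
        have htg : ∀ d ∈ t, d = '-' := by
          intro d hd
          have := List.mem_takeWhile_imp (p := q) (ht ▸ hd)
          simpa [hq, hc] using this
        have hrun := pvGapRun t rest (i + 1) htg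
        rw [hsplit] at hrun
        have e1 : i + (1 + (t.length : Int)) = i + 1 + (t.length : Int) := by ring
        rcases hE : pvEndStreak false rest with _ | _ <;>
          simp [pvBody, pvEndStreak, hc, hrun.1, hrun.2, hE, e1] <;> omega
      · -- non-gap run: emit [i, i+run], then continue after the run
        have htg : ∀ d ∈ t, ¬ d = '-' := by
          intro d hd
          have := List.mem_takeWhile_imp (p := q) (ht ▸ hd)
          simpa [hq, hc] using this
        have hrun := pvNonGapRun t rest (i + 1) htg
        rw [hsplit] at hrun
        rcases hrest' : rest with _ | ⟨r, rs⟩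
        · -- the non-gap run reaches the end of the string
          rw [hrest'] at hrun hlen
          simp only [List.length_nil] at hlen
          simp [pvBody, pvEndStreak, hc, hrun.1, hrun.2]
          omega
        · -- the char right after the run is a gap
          have hr : r = '-' := by
            have hh := pvDropHead (hrst ▸ hrest' : cs'.dropWhile q = r :: rs)
            simpa [hq, hc] using hh
          rw [hrest'] at hrun hlen
          simp only [List.length_cons] at hlen
          have e1 : i + (1 + (t.length : Int)) = i + 1 + (t.length : Int) := by ring
          rcases hE : pvEndStreak false rs with _ | _ <;>
            simp [pvBody, pvEndStreak, hc, hr, hrun.1, hrun.2, hE, e1] <;> omega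

-- ===== VERDICT (by name: the statement is the Claim_ definition above) =====
theorem alignment_to_range_list_spec : Claim_equal_alignment_to_range_list := by
  intro alignment _
  unfold Spec_alignment_to_range_list alignment_to_range_list_alt
  rw [pvA_char, pvB_char alignment.toList.length alignment.toList le_rfl]
  simp
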